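-- pv_equiv track=rewrite | github.com/seanbearden/SpinSAT | scripts/verify.py | parse_solver_output
-- ===== SOURCE A (Python) =====
-- def parse_solver_output(text):
--     """Parse solver stdout, return (status, assignment_dict or None)."""
--     status = None
--     lits = []
--     for line in text.splitlines():
--         line = line.strip()
--         if line.startswith('s '):
--             status = line[2:]
--         elif line.startswith('v '):
--             for tok in line[2:].split():
--                 val = int(tok)
--                 if val != 0:
--                     lits.append(val)
--     if status != 'SATISFIABLE':
--         return status, None
--     assignment = {}
--     for lit in lits:
--         var = abs(lit)
--         assignment[var] = lit > 0
--     return status, assignment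
-- ===== SOURCE B (Python) =====
-- def parse_solver_output(text):
--     """Parse solver stdout, return (status, assignment_dict or None)."""
--     lines = [ln.strip() for ln in text.splitlines()]
--     status = None
--     for ln in reversed(lines):
--         if ln.startswith('s '):
--             status = ln[2:]
--             break
--     if status != 'SATISFIABLE':
--         return status, None
--     assignment = {}
--     for ln in lines:
--         if ln.startswith('v '):
--             for tok in ln[2:].split():
--                 val = int(tok)
--                 if val != 0:
--                     assignment[abs(val)] = val > 0
--     return status, assignment
-- ===== Notes on version B (the rewrite author's own statement) =====
-- stated objective: alternative
-- what changed: B finds the status by a reverse scan for the last 's ' line and returns early when it is not SATISFIABLE, parsing 'v ' lines (building the assignment dict inline, with no intermediate literal list) only in the satisfiable case.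
import Mathlib
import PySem

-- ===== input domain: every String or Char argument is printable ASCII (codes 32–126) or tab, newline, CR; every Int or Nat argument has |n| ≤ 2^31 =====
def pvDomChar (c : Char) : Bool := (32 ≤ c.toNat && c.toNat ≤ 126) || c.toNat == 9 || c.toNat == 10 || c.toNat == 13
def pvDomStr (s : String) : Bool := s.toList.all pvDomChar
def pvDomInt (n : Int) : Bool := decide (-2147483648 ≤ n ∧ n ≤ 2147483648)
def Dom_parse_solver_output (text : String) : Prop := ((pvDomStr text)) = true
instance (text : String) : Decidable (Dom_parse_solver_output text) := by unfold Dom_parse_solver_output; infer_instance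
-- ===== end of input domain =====

-- B replaces A's collect-then-reloop shape by a reverse scan for the last 's ' line with an
-- early return when the status is not SATISFIABLE, building the assignment dict inline on the
-- 'v ' lines only in the satisfiable case (objective: alternative decomposition).

-- ===== PORT A =====

-- val = int(tok); if val != 0: lits.append(val)   (ofChars? = none only where int() raises, excluded by Pre_)
def psoTokStepA (lits : List Int) (tok : List Char) : List Int :=
  let val := (PySem.Int.ofChars? tok).getD 0
  if val ≠ 0 then lits ++ [val] else lits

-- one iteration of A's line loop over the state (status, lits)
def psoLineStepA (st : Option (List Char) × List Int) (line0 : List Char) :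
    Option (List Char) × List Int :=
  let line := PySem.Chars.strip line0
  if PySem.Chars.startswith line ['s', ' '] then
    (some (PySem.List.slice line (some 2) none), st.2)
  else if PySem.Chars.startswith line ['v', ' '] then
    (st.1, (PySem.Chars.split₀ (PySem.List.slice line (some 2) none)).foldl psoTokStepA st.2)
  else st

-- assignment[abs(lit)] = lit > 0
def psoAssignStepA (d : PySem.Dict Int Bool) (lit : Int) : PySem.Dict Int Bool :=
  d.insert |lit| (decide (0 < lit))

def parse_solver_output (text : String) : Option String × (Option (List (Int × Bool))) :=
  let st := (PySem.Chars.splitlines text.toList).foldl psoLineStepA (none, [])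
  if st.1 ≠ some "SATISFIABLE".toList then (st.1.map String.ofList, none)
  else (st.1.map String.ofList, some ((st.2.foldl psoAssignStepA PySem.Dict.empty).items))

-- ===== PORT B =====

-- the reverse scan with break: first 's ' line of the (already reversed) stripped lines
def psoFindStatusB : List (List Char) → Option (List Char)
  | [] => none
  | l :: rest =>
      if PySem.Chars.startswith l ['s', ' '] then some (PySem.List.slice l (some 2) none)
      else psoFindStatusB rest

-- one 'v ' line: insert each nonzero parsed token directly into the dict
def psoVLineStepB (d : PySem.Dict Int Bool) (line : List Char) : PySem.Dict Int Bool :=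
  if PySem.Chars.startswith line ['v', ' '] then
    (PySem.Chars.split₀ (PySem.List.slice line (some 2) none)).foldl
      (fun d tok =>
        let val := (PySem.Int.ofChars? tok).getD 0
        if val ≠ 0 then d.insert |val| (decide (0 < val)) else d) d
  else d

def parse_solver_output_alt (text : String) : Option String × (Option (List (Int × Bool))) :=
  let lines := (PySem.Chars.splitlines text.toList).map PySem.Chars.strip
  let status := psoFindStatusB lines.reverse
  if status ≠ some "SATISFIABLE".toList then (status.map String.ofList, none)
  else (status.map String.ofList, some ((lines.foldl psoVLineStepB PySem.Dict.empty).items))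

-- ===== PRECONDITION & SPEC =====
-- Pre_ excludes exactly the inputs on which A raises ValueError: a 'v ' line carrying a token
-- that int() rejects.
def Pre_parse_solver_output (text : String) : Prop :=
  ∀ line ∈ PySem.Chars.splitlines text.toList,
    PySem.Chars.startswith (PySem.Chars.strip line) ['v', ' '] = true →
    ∀ tok ∈ PySem.Chars.split₀
        (PySem.List.slice (PySem.Chars.strip line) (some 2) none),
      (PySem.Int.ofChars? tok).isSome = true

instance (text : String) : Decidable (Pre_parse_solver_output text) := by
  unfold Pre_parse_solver_output; infer_instance

def pvWitness_parse_solver_output : String := "s SATISFIABLE\nv 1 -2 0"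

def Spec_parse_solver_output (text : String) (out : Option String × (Option (List (Int × Bool)))) : Prop := out = parse_solver_output_alt text
instance (text : String) (out : Option String × (Option (List (Int × Bool)))) : Decidable (Spec_parse_solver_output text out) := by unfold Spec_parse_solver_output; infer_instance

-- ===== CLAIM (what is proved, stated in full; the proofs are below) =====
def Claim_equal_parse_solver_output : Prop := ∀ (text : String), Dom_parse_solver_output text → Pre_parse_solver_output text → Spec_parse_solver_output text (parse_solver_output text)

-- ===== LEMMAS AND PROOFS =====

-- an 's ' line is not a 'v ' line
theorem pso_s_not_v (l : List Char) (h : PySem.Chars.startswith l ['s', ' '] = true) :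
    PySem.Chars.startswith l ['v', ' '] = false := by
  rw [PySem.Chars.startswith_iff] at h
  rcases h with ⟨t, rfl⟩
  by_contra hv
  rw [Bool.not_eq_false, PySem.Chars.startswith_iff] at hv
  rcases hv with ⟨u, hu⟩
  simp at hu

-- psoFindStatusB over a snoc
theorem psoFindStatusB_append_singleton (xs : List (List Char)) (y : List Char) :
    psoFindStatusB (xs ++ [y]) =
      (psoFindStatusB xs).or
        (if PySem.Chars.startswith y ['s', ' '] then
          some (PySem.List.slice y (some 2) none) else none) := by
  induction xs with
  | nil => cases h : PySem.Chars.startswith y ['s', ' '] <;> simp [psoFindStatusB, h]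
  | cons x xs ih =>
      by_cases hx : PySem.Chars.startswith x ['s', ' '] <;>
        simp [psoFindStatusB, hx, ih]

-- A's folded status is B's reverse scan (over the stripped lines), or the initial status
theorem pso_status_eq (ls : List (List Char)) (p : Option (List Char) × List Int) :
    (ls.foldl psoLineStepA p).1 =
      (psoFindStatusB (ls.map PySem.Chars.strip).reverse).or p.1 := by
  induction ls generalizing p with
  | nil => simp [psoFindStatusB]
  | cons l ls ih =>
      rw [List.foldl_cons, ih]
      simp only [List.map_cons, List.reverse_cons, psoFindStatusB_append_singleton,
        Option.or_assoc]
      by_cases hs : PySem.Chars.startswith (PySem.Chars.strip l) ['s', ' ']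
      · simp [psoLineStepA, hs]
      · by_cases hv : PySem.Chars.startswith (PySem.Chars.strip l) ['v', ' '] <;>
          simp [psoLineStepA, hs, hv]

-- per-token fusion: folding the appended literals into the dict afterwards
-- equals inserting each token's value directly
theorem pso_tok_fuse (toks : List (List Char)) (lits : List Int) (d : PySem.Dict Int Bool) :
    (toks.foldl psoTokStepA lits).foldl psoAssignStepA d =
      toks.foldl
        (fun d tok =>
          let val := (PySem.Int.ofChars? tok).getD 0
          if val ≠ 0 then d.insert |val| (decide (0 < val)) else d)
        (lits.foldl psoAssignStepA d) := by
  induction toks generalizing lits d with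
  | nil => rfl
  | cons tok toks ih =>
      simp only [List.foldl_cons, ih, psoTokStepA]
      split_ifs with h
      · rw [List.foldl_append]; rfl
      · rfl

-- per-line fusion: A's collected literals, folded into a dict, equal B's inline dict pass
theorem pso_lits_fuse (ls : List (List Char)) (p : Option (List Char) × List Int)
    (d : PySem.Dict Int Bool) :
    ((ls.foldl psoLineStepA p).2).foldl psoAssignStepA d =
      (ls.map PySem.Chars.strip).foldl psoVLineStepB (p.2.foldl psoAssignStepA d) := by
  induction ls generalizing p d with
  | nil => rfl
  | cons l ls ih =>
      rw [List.foldl_cons, ih]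
      simp only [List.map_cons, List.foldl_cons]
      congr 1
      by_cases hs : PySem.Chars.startswith (PySem.Chars.strip l) ['s', ' ']
      · simp [psoLineStepA, psoVLineStepB, hs, pso_s_not_v _ hs]
      · by_cases hv : PySem.Chars.startswith (PySem.Chars.strip l) ['v', ' ']
        · simp only [psoLineStepA, psoVLineStepB, hs, hv, if_true, if_false,
            Bool.false_eq_true]
          exact pso_tok_fuse _ _ _
        · simp [psoLineStepA, psoVLineStepB, hs, hv]

-- ===== VERDICT (by name: the statement is the Claim_ definition above) =====
theorem parse_solver_output_spec : Claim_equal_parse_solver_output := by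
  intro text _ _
  unfold Spec_parse_solver_output parse_solver_output parse_solver_output_alt
  have hst := pso_status_eq (PySem.Chars.splitlines text.toList) (none, [])
  rw [Option.or_none] at hst
  have hd := pso_lits_fuse (PySem.Chars.splitlines text.toList) (none, [])
    PySem.Dict.empty
  simp only [hst, hd]
  rfl
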